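-- pv_equiv track=rewrite | github.com/Aposentei1/keylogger-educacional | keylogger.py | limpar_log
-- ===== SOURCE A (Python) =====
-- def limpar_log(raw_log):
--     resultado = []
--     i = 0
--     while i < len(raw_log):
--         if raw_log[i] == '[':  # começa um marcador tipo [space], [backspace]
--             end = raw_log.find(']', i)
--             if end == -1:
--                 # marcador não fechado, ignora e continua
--                 i += 1
--                 continue
--             marcador = raw_log[i+1:end]
--
--             if marcador == 'space':
--                 resultado.append(' ')
--             elif marcador == 'backspace':
--                 if resultado:
--                     resultado.pop()  # apaga último caractere
--             # aqui você pode adicionar tratamento para outros marcadores, se quiser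
--             # senão ignora os demais
--
--             i = end + 1
--         else:
--             resultado.append(raw_log[i])
--             i += 1
--     return ''.join(resultado)
-- ===== SOURCE B (Python) =====
-- def limpar_log(raw_log):
--     # Single pass with a state machine: outside a marker, chars are emitted
--     # ('[' opens a marker); inside a marker, chars are buffered until ']'
--     # applies the marker; an unclosed marker at end of input means the rest
--     # of the string is literal text, emitted with '[' characters dropped.
--     resultado = []
--     in_marker = False
--     buf = []
--     for c in raw_log:
--         if in_marker:
--             if c == ']':
--                 m = ''.join(buf)
--                 if m == 'space':
--                     resultado.append(' ')
--                 elif m == 'backspace':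
--                     if resultado:
--                         resultado.pop()
--                 in_marker = False
--                 buf = []
--             else:
--                 buf.append(c)
--         elif c == '[':
--             in_marker = True
--         else:
--             resultado.append(c)
--     if in_marker:
--         for c in buf:
--             if c != '[':
--                 resultado.append(c)
--     return ''.join(resultado)
-- ===== Notes on version B (the rewrite author's own statement) =====
-- stated objective: faster
-- what changed: Replaced the index loop that calls str.find(']', i) at every '[' (quadratic when markers are unclosed, since each failed find rescans the tail) with a single character-by-character state machine that buffers marker text and flushes an unclosed buffer at end of input.
import Mathlib
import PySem

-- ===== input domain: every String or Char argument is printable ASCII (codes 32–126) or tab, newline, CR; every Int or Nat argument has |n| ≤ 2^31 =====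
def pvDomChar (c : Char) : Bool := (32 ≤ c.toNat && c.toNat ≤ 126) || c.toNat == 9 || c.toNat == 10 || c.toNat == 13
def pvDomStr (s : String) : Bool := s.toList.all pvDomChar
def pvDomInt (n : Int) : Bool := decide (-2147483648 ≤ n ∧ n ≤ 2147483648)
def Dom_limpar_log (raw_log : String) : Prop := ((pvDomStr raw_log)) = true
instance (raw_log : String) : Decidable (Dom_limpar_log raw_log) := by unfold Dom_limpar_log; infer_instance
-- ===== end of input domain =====

-- B replaces A's index loop with repeated find(']', i) (quadratic on unclosed markers)
-- by a one-pass state machine over the characters: asymptotically faster, same output.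

-- shared helper: the marker branch chain (identical lines in both Pythons):
-- if marcador == 'space': append ' ' ; elif marcador == 'backspace': pop last if nonempty; else ignore.
-- 'pop last if nonempty' is List.dropLast (dropLast [] = []).
def applyMark (marcador : List Char) (res : List Char) : List Char :=
  if marcador = "space".toList then res ++ [' ']
  else if marcador = "backspace".toList then res.dropLast
  else res

-- ===== PORT A =====
-- needed by loopA's decreasing_by: a successful find(']', i) points at or after i
theorem findFrom_toNat_ge (cs sub : List Char) (i : Nat) (h : i ≤ cs.length)
    (hne : PySem.Chars.findFrom cs sub (i : Int) none ≠ -1) :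
    i ≤ (PySem.Chars.findFrom cs sub (i : Int) none).toNat := by
  rw [PySem.Chars.findFrom_natCast cs sub i h] at hne ⊢
  by_cases hf : PySem.Chars.find (cs.drop i) sub = -1
  · exact absurd (by rw [hf]; simp) hne
  · have := PySem.Chars.neg_one_le_find (cs.drop i) sub
    rw [if_neg hf]
    omega

-- the while loop of A: state (i, resultado); raw_log.find(']', i) is Chars.findFrom
def loopA (cs : List Char) (i : Nat) (res : List Char) : List Char :=
  if h : i < cs.length then
    if cs[i] = '[' then
      let e := PySem.Chars.findFrom cs [']'] (i : Int) none
      if he : e = -1 then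
        loopA cs (i + 1) res                     -- marcador não fechado
      else
        let marcador := PySem.List.slice cs (some ((i : Int) + 1)) (some e)
        loopA cs (e.toNat + 1) (applyMark marcador res)
    else
      loopA cs (i + 1) (res ++ [cs[i]])
  else res
termination_by cs.length - i
decreasing_by
  · omega
  · have := findFrom_toNat_ge cs [']'] i (by omega) he
    omega
  · omega

def limpar_log (raw_log : String) : String :=
  String.mk (loopA raw_log.toList 0 [])          -- ''.join(resultado)

-- ===== PORT B =====
-- the for loop of B: state (in_marker, buf, resultado); at end of input an open
-- marker buffer is flushed as literal text minus '[' characters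
def loopB (cs : List Char) (inm : Bool) (buf : List Char) (res : List Char) : List Char :=
  match cs with
  | [] => if inm then res ++ buf.filter (· ≠ '[') else res
  | c :: rest =>
    if inm then
      if c = ']' then loopB rest false [] (applyMark buf res)
      else loopB rest true (buf ++ [c]) res
    else if c = '[' then loopB rest true buf res
    else loopB rest false buf (res ++ [c])

def limpar_log_alt (raw_log : String) : String :=
  String.mk (loopB raw_log.toList false [] [])   -- ''.join(resultado)

-- ===== PRECONDITION & SPEC =====
def Spec_limpar_log (raw_log : String) (out : String) : Prop := out = limpar_log_alt raw_log
instance (raw_log : String) (out : String) : Decidable (Spec_limpar_log raw_log out) := by unfold Spec_limpar_log; infer_instance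

-- ===== CLAIM (what is proved, stated in full; the proofs are below) =====
def Claim_equal_limpar_log : Prop := ∀ (raw_log : String), Dom_limpar_log raw_log → Spec_limpar_log raw_log (limpar_log raw_log)

-- ===== LEMMAS AND PROOFS =====

-- reference function both ports are reduced to: structural recursion on the text,
-- consuming a whole '[…]' marker at once, and stopping (filter) when no ']' remains
def clean (res : List Char) (cs : List Char) : List Char :=
  match cs with
  | [] => res
  | c :: rest =>
    if c = '[' then
      let f := PySem.Chars.find rest [']']
      if f = -1 then res ++ rest.filter (· ≠ '[')
      else clean (applyMark (rest.take f.toNat) res) (rest.drop (f.toNat + 1))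
    else clean (res ++ [c]) rest
termination_by cs.length
decreasing_by
  · simp
  · simp

-- find s sub = k as soon as k carries the first occurrence
theorem find_eq_of_spec (s sub : List Char) (k : Nat)
    (h1 : sub <+: s.drop k) (h2 : ∀ j < k, ¬ sub <+: s.drop j) :
    PySem.Chars.find s sub = (k : Int) := by
  have hin : sub <:+: s := h1.isInfix.trans (List.drop_suffix k s).isInfix
  have hne : PySem.Chars.find s sub ≠ -1 := by
    simp only [ne_eq, PySem.Chars.find_eq_neg_one_iff]
    exact not_not_intro hin
  have h0 : 0 ≤ PySem.Chars.find s sub := by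
    have := PySem.Chars.neg_one_le_find s sub; omega
  obtain ⟨hp, hmin⟩ := PySem.Chars.find_spec h0
  have hFk : (PySem.Chars.find s sub).toNat = k := by
    rcases Nat.lt_trichotomy (PySem.Chars.find s sub).toNat k with hlt | heq | hgt
    · exact absurd hp (h2 _ hlt)
    · exact heq
    · exact absurd h1 (hmin k hgt)
  omega

theorem find_singleton_cons_of_ne (c a : Char) (l : List Char) (hca : c ≠ a) :
    PySem.Chars.find (c :: l) [a] =
      if PySem.Chars.find l [a] = -1 then -1
      else PySem.Chars.find l [a] + 1 := by
  by_cases h : PySem.Chars.find l [a] = -1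
  · rw [if_pos h, PySem.Chars.find_eq_neg_one_iff]
    rw [PySem.Chars.find_eq_neg_one_iff] at h
    simp only [List.singleton_infix_iff, List.mem_cons] at h ⊢
    rintro (rfl | ha)
    · exact hca rfl
    · exact h ha
  · have h0 : 0 ≤ PySem.Chars.find l [a] := by
      have := PySem.Chars.neg_one_le_find l [a]; omega
    obtain ⟨hp, hmin⟩ := PySem.Chars.find_spec h0
    rw [if_neg h]
    have heq := find_eq_of_spec (c :: l) [a] ((PySem.Chars.find l [a]).toNat + 1)
      (by simpa using hp)
      (by
        intro j hj
        cases j with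
        | zero =>
          simp only [List.drop_zero, List.cons_prefix_cons]
          rintro ⟨rfl, -⟩; exact hca rfl
        | succ j => simpa using hmin j (by omega))
    rw [heq]; omega

-- A after a failed find: every later find fails too, so the loop appends
-- the rest of the text, skipping '[' characters
theorem loopA_nofind (cs : List Char) (i : Nat) (res : List Char)
    (h : ¬ [']'] <:+: cs.drop i) :
    loopA cs i res = res ++ (cs.drop i).filter (· ≠ '[') := by
  by_cases hi : i < cs.length
  · have hdrop : cs.drop i = cs[i] :: cs.drop (i + 1) := (List.getElem_cons_drop hi).symm
    have htail : ¬ [']'] <:+: cs.drop (i + 1) := by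
      intro hin
      exact h (hdrop ▸ hin.trans (List.suffix_cons cs[i] (cs.drop (i+1))).isInfix)
    rw [loopA, dif_pos hi]
    by_cases hc : cs[i] = '['
    · have hfind : PySem.Chars.find (cs.drop i) [']'] = -1 :=
        (PySem.Chars.find_eq_neg_one_iff _ _).mpr h
      have he : PySem.Chars.findFrom cs [']'] (i : Int) none = -1 := by
        rw [PySem.Chars.findFrom_natCast cs [']'] i (by omega), if_pos hfind]
      rw [if_pos hc]
      simp only [he, reduceDIte]
      rw [loopA_nofind cs (i+1) res htail]
      conv_rhs => rw [hdrop, List.filter_cons]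
      simp [hc]
    · rw [if_neg hc, loopA_nofind cs (i+1) (res ++ [cs[i]]) htail]
      conv_rhs => rw [hdrop, List.filter_cons]
      simp [hc]
  · have hnil : cs.drop i = [] := List.drop_eq_nil_of_le (by omega)
    rw [loopA, dif_neg hi, hnil]
    simp
termination_by cs.length - i

-- A's index loop computes clean of the remaining text
theorem loopA_eq (cs : List Char) (i : Nat) (res : List Char) :
    loopA cs i res = clean res (cs.drop i) := by
  by_cases hi : i < cs.length
  · have hdrop : cs.drop i = cs[i] :: cs.drop (i + 1) := (List.getElem_cons_drop hi).symm
    rw [loopA, dif_pos hi]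
    by_cases hc : cs[i] = '['
    · have hconsd : PySem.Chars.find (cs.drop i) [']'] =
          if PySem.Chars.find (cs.drop (i+1)) [']'] = -1 then -1
          else PySem.Chars.find (cs.drop (i+1)) [']'] + 1 := by
        rw [hdrop]
        exact find_singleton_cons_of_ne cs[i] ']' (cs.drop (i+1)) (by rw [hc]; decide)
      have hff := PySem.Chars.findFrom_natCast cs [']'] i (by omega)
      rw [if_pos hc]
      conv_rhs => rw [hdrop]
      rw [clean, if_pos hc]
      by_cases hg : PySem.Chars.find (cs.drop (i+1)) [']'] = -1
      · -- no closing bracket anywhere after position i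
        have hfind : PySem.Chars.find (cs.drop i) [']'] = -1 := by
          rw [hconsd, if_pos hg]
        have he : PySem.Chars.findFrom cs [']'] (i : Int) none = -1 := by
          rw [hff, if_pos hfind]
        simp only [he, reduceDIte, hg, reduceIte]
        exact loopA_nofind cs (i+1) res ((PySem.Chars.find_eq_neg_one_iff _ _).mp hg)
      · have hg0 : 0 ≤ PySem.Chars.find (cs.drop (i+1)) [']'] := by
          have := PySem.Chars.neg_one_le_find (cs.drop (i+1)) [']']; omega
        set g := PySem.Chars.find (cs.drop (i+1)) [']'] with hgdef
        have hfind : PySem.Chars.find (cs.drop i) [']'] = g + 1 := by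
          rw [hconsd, if_neg hg]
        have hglen : g.toNat < (cs.drop (i+1)).length := by
          obtain ⟨hp, -⟩ := PySem.Chars.find_spec (s := cs.drop (i+1)) (sub := [']']) hg0
          have hne : (cs.drop (i+1)).drop g.toNat ≠ [] := by
            intro hnil; rw [hnil] at hp; simp at hp
          have hlen := List.length_pos_of_ne_nil hne
          simp only [List.length_drop] at hlen ⊢
          omega
        have he : PySem.Chars.findFrom cs [']'] (i : Int) none = (i : Int) + g + 1 := by
          rw [hff, hfind]
          have : g + 1 ≠ -1 := by omega
          rw [if_neg this]; ring
        have hene : PySem.Chars.findFrom cs [']'] (i : Int) none ≠ -1 := by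
          rw [he]; omega
        simp only [hene, reduceDIte, hg, reduceIte]
        have hetoNat : (PySem.Chars.findFrom cs [']'] (i : Int) none).toNat = i + g.toNat + 1 := by
          rw [he]; omega
        have hslice : PySem.List.slice cs (some ((i : Int) + 1))
              (some (PySem.Chars.findFrom cs [']'] (i : Int) none))
            = (cs.drop (i+1)).take g.toNat := by
          rw [he]
          have h1 : (i : Int) + g + 1 = ((i + g.toNat + 1 : Nat) : Int) := by push_cast; omega
          have h2 : ((i : Int) + 1) = ((i + 1 : Nat) : Int) := by push_cast; ring
          rw [h1, h2, PySem.List.slice_natCast]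
          congr 1
          omega
        rw [hslice, hetoNat]
        rw [loopA_eq cs (i + g.toNat + 1 + 1) (applyMark ((cs.drop (i+1)).take g.toNat) res)]
        congr 1
        rw [List.drop_drop]
        congr 1
        omega
    · rw [if_neg hc]
      conv_rhs => rw [hdrop]
      rw [clean, if_neg hc]
      exact loopA_eq cs (i+1) (res ++ [cs[i]])
  · have hnil : cs.drop i = [] := List.drop_eq_nil_of_le (by omega)
    rw [loopA, dif_neg hi, hnil, clean]
termination_by cs.length - i

-- B inside a marker: consume to the first ']' (or flush at end of input)
theorem loopB_true (cs : List Char) (buf res : List Char) :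
    loopB cs true buf res =
      if PySem.Chars.find cs [']'] = -1 then
        res ++ (buf ++ cs).filter (· ≠ '[')
      else
        loopB (cs.drop ((PySem.Chars.find cs [']']).toNat + 1)) false []
          (applyMark (buf ++ cs.take (PySem.Chars.find cs [']']).toNat) res) := by
  induction cs generalizing buf with
  | nil =>
    have hnil : PySem.Chars.find ([] : List Char) [']'] = -1 := by
      rw [PySem.Chars.find_eq_neg_one_iff]; simp
    rw [if_pos hnil, loopB]
    simp
  | cons c rest ih =>
    by_cases hc : c = ']'
    · subst hc
      have hfind : PySem.Chars.find (']' :: rest) [']'] = 0 :=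
        find_eq_of_spec _ _ 0 (by simp) (by omega)
      have : PySem.Chars.find (']' :: rest) [']'] ≠ -1 := by omega
      rw [if_neg this, loopB, hfind]
      simp
    · have hcons := find_singleton_cons_of_ne c ']' rest hc
      rw [loopB, if_pos rfl, if_neg hc, ih (buf ++ [c])]
      by_cases hg : PySem.Chars.find rest [']'] = -1
      · have hfc : PySem.Chars.find (c :: rest) [']'] = -1 := by
          rw [hcons, if_pos hg]
        rw [if_pos hg, if_pos hfc]
        simp
      · have hg0 : 0 ≤ PySem.Chars.find rest [']'] := by
          have := PySem.Chars.neg_one_le_find rest [']']; omega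
        have hfc : PySem.Chars.find (c :: rest) [']'] = PySem.Chars.find rest [']'] + 1 := by
          rw [hcons, if_neg hg]
        have hfcne : PySem.Chars.find (c :: rest) [']'] ≠ -1 := by omega
        rw [if_neg hg, if_neg hfcne, hfc]
        have ht : (PySem.Chars.find rest [']'] + 1).toNat = (PySem.Chars.find rest [']']).toNat + 1 := by
          omega
        rw [ht]
        simp

-- B outside a marker computes clean
theorem loopB_false (cs res : List Char) :
    loopB cs false [] res = clean res cs := by
  induction hn : cs.length using Nat.strong_induction_on generalizing cs res with
  | _ n ih =>
  subst hn
  rcases cs with _ | ⟨c, rest⟩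
  · rw [loopB, clean]; simp
  · by_cases hc : c = '['
    · subst hc
      rw [loopB, clean]
      simp only [Bool.false_eq_true, if_false, reduceIte]
      rw [loopB_true rest [] res]
      by_cases hg : PySem.Chars.find rest [']'] = -1
      · rw [if_pos hg, if_pos hg]
        simp
      · rw [if_neg hg, if_neg hg]
        have hrec := ih ((rest.drop ((PySem.Chars.find rest [']']).toNat + 1)).length)
          (by simp only [List.length_drop, List.length_cons]; omega)
          (rest.drop ((PySem.Chars.find rest [']']).toNat + 1))
          (applyMark ([] ++ rest.take (PySem.Chars.find rest [']']).toNat) res) rfl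
        rw [hrec]
        simp
    · rw [loopB, clean]
      simp only [hc, Bool.false_eq_true, if_false]
      exact ih rest.length (by simp) rest (res ++ [c]) rfl

-- ===== VERDICT (by name: the statement is the Claim_ definition above) =====
theorem limpar_log_spec : Claim_equal_limpar_log := by
  intro raw_log _
  unfold Spec_limpar_log limpar_log limpar_log_alt
  rw [loopA_eq raw_log.toList 0 [], loopB_false raw_log.toList []]
  simp
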